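-- pv_equiv track=rewrite | github.com/serendipitYang/missingness_study-stepbd-catie | utils.py | get_event_by_visit
-- ===== SOURCE A (Python) =====
-- def get_event_by_visit(Alist):
--     temp_ind = 0
--     y = [0 for _ in range(len(Alist))]
--     for idx, l in enumerate(Alist):
--         if temp_ind==2: # How many missing visits are needed to identify a dropout, 2 in this case
--             y[idx]=1
--         elif idx>0:
--             if l-Alist[idx-1]>3:
--                 temp_ind+=1
--     if 1 not in y:
--         y[len(y)-1]=1
--     return y
-- ===== SOURCE B (Python) =====
-- def get_event_by_visit(Alist):
--     """Declarative: filter the gap indices out of zipped adjacent pairs, index the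
--     second one, and build y as a comprehension comparing each position to it."""
--     gaps = [i + 1 for i, (p, c) in enumerate(zip(Alist, Alist[1:])) if c - p > 3]
--     n = len(Alist)
--     y = [int(len(gaps) >= 2 and i > gaps[1]) for i in range(n)]
--     if 1 not in y:
--         y[n - 1] = 1
--     return y
-- ===== Notes on version B (the rewrite author's own statement) =====
-- stated objective: alternative
-- what changed: Replaces A's single stateful scan that mutates y cell-by-cell under a running counter with a declarative pipeline: filter all gap indices out of zip(Alist, Alist[1:]), index the second gap, and build y in one comprehension comparing each position against it.
-- outside the precondition, e.g. on get_event_by_visit([]): A raises IndexError, B raises IndexError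
import Mathlib
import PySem

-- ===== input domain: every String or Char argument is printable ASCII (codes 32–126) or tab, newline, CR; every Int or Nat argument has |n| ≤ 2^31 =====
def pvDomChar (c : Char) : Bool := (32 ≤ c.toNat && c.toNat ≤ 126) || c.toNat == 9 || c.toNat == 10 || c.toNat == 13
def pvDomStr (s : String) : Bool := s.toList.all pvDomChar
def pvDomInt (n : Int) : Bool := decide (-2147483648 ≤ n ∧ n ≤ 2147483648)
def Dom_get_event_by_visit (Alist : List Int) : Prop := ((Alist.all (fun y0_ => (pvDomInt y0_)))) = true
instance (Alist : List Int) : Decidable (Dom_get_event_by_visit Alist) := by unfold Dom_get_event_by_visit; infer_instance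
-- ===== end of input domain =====

-- B replaces A's single stateful scan (counter + cell-by-cell mutation of y) with a
-- declarative pipeline: filter all gap indices out of the zipped adjacent pairs, index the
-- second gap, and build y in one comprehension (objective: alternative, same O(n) cost).

-- ===== PORT A =====
-- A's for loop over enumerate(Alist), carrying (temp_ind, y); y[idx]=1 is List.set
-- (idx is always a valid non-negative index when reached, so .toNat is exact).
def pvLoopA (Alist : List Int) : List (Int × Int) → Int × List Int → Int × List Int
  | [], st => st
  | (idx, l) :: rest, (temp_ind, y) =>
    if temp_ind == 2 then pvLoopA Alist rest (temp_ind, y.set idx.toNat 1)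
    else if idx > 0 then
      if l - ((PySem.List.pyGet? Alist (idx - 1)).getD 0) > 3 then
        pvLoopA Alist rest (temp_ind + 1, y)
      else pvLoopA Alist rest (temp_ind, y)
    else pvLoopA Alist rest (temp_ind, y)

def get_event_by_visit (Alist : List Int) : List Int :=
  let y0 := List.replicate Alist.length (0 : Int)
  let y := (pvLoopA Alist (PySem.List.enumerate Alist 0) (0, y0)).2
  if (1 : Int) ∈ y then y else y.set (y.length - 1) 1

-- ===== PORT B =====
-- gaps = [i + 1 for i, (p, c) in enumerate(zip(Alist, Alist[1:])) if c - p > 3];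
-- the comprehension over range(n) with the short-circuit 'len(gaps) >= 2 and i > gaps[1]'
-- (gaps[1] is only read when it exists, so the total pyGetD is exact here).
def get_event_by_visit_alt (Alist : List Int) : List Int :=
  let gaps : List Int :=
    (PySem.List.enumerate (Alist.zip (PySem.List.slice Alist (some 1) none)) 0).filterMap
      (fun ipc => if ipc.2.2 - ipc.2.1 > 3 then some (ipc.1 + 1) else none)
  let n := Alist.length
  let y : List Int :=
    (PySem.List.pyRange 0 (n : Int) 1).map (fun i =>
      if 2 ≤ gaps.length ∧ PySem.List.pyGetD gaps 1 0 < i then 1 else 0)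
  if (1 : Int) ∈ y then y else y.set (n - 1) 1

-- ===== PRECONDITION & SPEC =====
-- Pre_ excludes only the empty list, on which Python A raises IndexError (y[len(y)-1] on []).
def Pre_get_event_by_visit (Alist : List Int) : Prop := Alist ≠ []
instance (Alist : List Int) : Decidable (Pre_get_event_by_visit Alist) := by
  unfold Pre_get_event_by_visit; infer_instance
def pvWitness_get_event_by_visit : List Int := ([0, 5, 6, 12, 13])

def Spec_get_event_by_visit (Alist : List Int) (out : List Int) : Prop := out = get_event_by_visit_alt Alist
instance (Alist : List Int) (out : List Int) : Decidable (Spec_get_event_by_visit Alist out) := by unfold Spec_get_event_by_visit; infer_instance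

-- ===== CLAIM (what is proved, stated in full; the proofs are below) =====
def Claim_equal_get_event_by_visit : Prop := ∀ (Alist : List Int), Dom_get_event_by_visit Alist → Pre_get_event_by_visit Alist → Spec_get_event_by_visit Alist (get_event_by_visit Alist)

-- ===== LEMMAS AND PROOFS =====

-- The sequence of gap indices, the common skeleton both ports are related to.
def pvGaps : Int → Int → List Int → List Int
  | _, _, [] => []
  | prev, k, a :: rest =>
    if a - prev > 3 then k :: pvGaps a (k + 1) rest else pvGaps a (k + 1) rest

-- B's filterMap comprehension computes exactly pvGaps.
lemma pvGaps_eq_filterMap :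
    ∀ (rest : List Int) (prev : Int) (s : Int),
      (PySem.List.enumerate ((prev :: rest).zip rest) s).filterMap
          (fun ipc => if ipc.2.2 - ipc.2.1 > 3 then some (ipc.1 + 1) else none)
        = pvGaps prev (s + 1) rest := by
  intro rest
  induction rest with
  | nil => intro prev s; simp [pvGaps, PySem.List.enumerate_nil]
  | cons a rest ih =>
      intro prev s
      rw [List.zip_cons_cons, PySem.List.enumerate_cons]
      simp only [List.filterMap_cons, pvGaps]
      by_cases h : a - prev > 3
      · simp only [h, if_pos, ih a (s + 1)]
      · simp only [h, if_false, ih a (s + 1)]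

-- The onset search of A (counting phase) reads off an element of pvGaps.
def pvFindOnset : Int → Nat → Nat → List Int → Option Nat
  | _, _, _, [] => none
  | prev, i, count, a :: rest =>
    if a - prev > 3 then
      if count + 1 == 2 then some i
      else pvFindOnset a (i + 1) (count + 1) rest
    else pvFindOnset a (i + 1) count rest

lemma pvFindOnset_lt :
    ∀ (rest : List Int) (prev : Int) (k cn o : Nat),
      pvFindOnset prev k cn rest = some o → o < k + rest.length := by
  intro rest
  induction rest with
  | nil => intro prev k cn o h; simp [pvFindOnset] at h
  | cons a rest ih =>
      intro prev k cn o h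
      simp only [pvFindOnset] at h
      split_ifs at h with h1 h2
      · simp at h; simp only [List.length_cons]; omega
      · have := ih a (k + 1) (cn + 1) o h; simp only [List.length_cons]; omega
      · have := ih a (k + 1) cn o h; simp only [List.length_cons]; omega

lemma pvFindOnset_gaps :
    ∀ (rest : List Int) (prev : Int) (k cn : Nat), cn ≤ 1 →
      (pvGaps prev (k : Int) rest)[1 - cn]?
        = (pvFindOnset prev k cn rest).map (fun o => (o : Int)) := by
  intro rest
  induction rest with
  | nil => intro prev k cn _; simp [pvGaps, pvFindOnset]
  | cons a rest ih =>
      intro prev k cn hcn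
      simp only [pvGaps, pvFindOnset]
      have hk1 : ((k : Int) + 1) = ((k + 1 : Nat) : Int) := by push_cast; ring
      by_cases h : a - prev > 3
      · simp only [h, if_pos]
        by_cases hc : cn = 1
        · subst hc; simp
        · have hc0 : cn = 0 := by omega
          subst hc0
          have h2 : ((0 : Nat) + 1 == 2) = false := by decide
          rw [h2]
          simp only [Bool.false_eq_true, if_false, List.getElem?_cons_succ, hk1]
          exact ih a (k + 1) 1 le_rfl
      · simp only [h, if_false, hk1]
        exact ih a (k + 1) cn hcn

-- Once temp_ind = 2, A's loop sets every remaining index to 1.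
lemma pvLoopA_two (Alist : List Int) :
    ∀ (rest : List Int) (k : Nat) (y : List Int), k + rest.length = y.length →
      pvLoopA Alist (PySem.List.enumerate rest (k : Int)) (2, y)
        = (2, y.take k ++ List.replicate rest.length 1) := by
  intro rest
  induction rest with
  | nil =>
      intro k y hk
      have ht : y.take k = y := List.take_of_length_le (by simp at hk; omega)
      simp [pvLoopA, ht]
  | cons a rest ih =>
      intro k y hk
      have hk' : k < y.length := by simp at hk; omega
      rw [PySem.List.enumerate_cons]
      have : ((k : Int) + 1) = ((k + 1 : Nat) : Int) := by push_cast; ring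
      simp only [pvLoopA, this, Int.toNat_natCast]
      rw [if_pos (by decide : (((2:Int)) == 2) = true)]
      rw [ih (k + 1) (y.set k 1) (by simp at hk ⊢; omega)]
      have hset : (y.set k 1).take (k + 1) = y.take k ++ [1] := by
        rw [List.set_eq_take_append_cons_drop, if_pos hk']
        have hlen : (y.take k).length = k := List.length_take_of_le (le_of_lt hk')
        rw [show k + 1 = (y.take k).length + 1 by rw [hlen], List.take_append]
        simp
      simp [hset, List.replicate_succ]

-- The counting phase of A's loop, related to the onset search.
lemma pvLoop_count (Alist : List Int) :
    ∀ (rest : List Int) (k : Nat) (prev : Int) (cn : Nat) (y : List Int),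
      1 ≤ k → cn ≤ 1 → Alist.drop (k - 1) = prev :: rest → y.length = Alist.length →
      (pvLoopA Alist (PySem.List.enumerate rest (k : Int)) ((cn : Int), y)).2
        = match pvFindOnset prev k cn rest with
          | none => y
          | some o => y.take (o + 1) ++ List.replicate (y.length - (o + 1)) 1 := by
  intro rest
  induction rest with
  | nil =>
      intro k prev cn y hk hc hdrop hy
      simp [PySem.List.enumerate, pvLoopA, pvFindOnset]
  | cons a rest ih =>
      intro k prev cn y hk hc hdrop hy
      have hlen : Alist.length - (k - 1) = rest.length + 2 := by
        have := congrArg List.length hdrop; simp at this; omega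
      have hk1 : k - 1 < Alist.length := by omega
      have hprev : Alist[k - 1]? = some prev := by
        have h0 : (Alist.drop (k - 1))[0]? = some prev := by rw [hdrop]; rfl
        rwa [List.getElem?_drop, Nat.add_zero] at h0
      have hcast : (k : Int) - 1 = ((k - 1 : Nat) : Int) := by omega
      have hget : PySem.List.pyGet? Alist ((k : Int) - 1) = some prev := by
        rw [hcast, PySem.List.pyGet?_natCast, hprev]
      have hne2 : (((cn : Int)) == 2) = false := by
        simp; omega
      have hpos : ((0 : Int) < (k : Int)) := by exact_mod_cast hk
      rw [PySem.List.enumerate_cons]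
      have hstep : ((k : Int) + 1) = ((k + 1 : Nat) : Int) := by push_cast; ring
      simp only [pvLoopA, hne2, Bool.false_eq_true, if_false, hpos, if_true, hget,
        Option.getD_some, hstep, pvFindOnset]
      have hdrop' : Alist.drop ((k + 1) - 1) = a :: rest := by
        have : Alist.drop k = a :: rest := by
          have := congrArg (List.drop 1) hdrop
          rwa [List.drop_drop, Nat.sub_add_cancel hk, List.drop_one, List.tail_cons] at this
        simpa using this
      by_cases hgap : a - prev > 3
      · simp only [hgap, if_true]
        by_cases hcn : cn = 1
        · subst hcn
          rw [show (((1:Nat):Int) + 1) = (2 : Int) by norm_num,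
            pvLoopA_two Alist rest (k + 1) y (by omega)]
          have hrl : y.length - (k + 1) = rest.length := by omega
          simp [hrl]
        · have hcn0 : cn = 0 := by omega
          subst hcn0
          rw [show (((0:Nat):Int) + 1) = ((1 : Nat) : Int) by norm_num,
            ih (k + 1) a 1 y (by omega) (by omega) hdrop' hy]
          norm_num
      · simp only [hgap, if_false]
        rw [ih (k + 1) a cn y (by omega) hc hdrop' hy]

lemma pvLoop_result (a : Int) (rest : List Int) :
    (pvLoopA (a :: rest) (PySem.List.enumerate (a :: rest) 0)
        (0, List.replicate (a :: rest).length (0 : Int))).2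
      = match pvFindOnset a 1 0 rest with
        | none => List.replicate (a :: rest).length (0 : Int)
        | some o => List.replicate (o + 1) (0 : Int)
            ++ List.replicate ((a :: rest).length - (o + 1)) (1 : Int) := by
  rw [PySem.List.enumerate_cons]
  have h0 : ((0 : Int) == 2) = false := by decide
  have h1 : ((0 : Int) + 1) = ((1 : Nat) : Int) := by norm_num
  simp only [pvLoopA, h0, Bool.false_eq_true, if_false, lt_irrefl, if_false, h1]
  have hpc := pvLoop_count (a :: rest) rest 1 a 0 (List.replicate (a :: rest).length 0)
      (le_refl 1) (by omega) (by simp) (by simp)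
  simp only [Nat.cast_zero] at hpc
  rw [hpc]
  cases hfo : pvFindOnset a 1 0 rest with
  | none => simp
  | some o =>
      have ho : o < 1 + rest.length := pvFindOnset_lt rest a 1 0 o hfo
      simp only [List.take_replicate, List.length_replicate]
      rw [Nat.min_eq_left (by simp only [List.length_cons]; omega)]

-- B's comprehension over range(n) against a threshold o.
lemma pvMapThresh (o : Nat) :
    ∀ n : Nat, (PySem.List.pyRange 0 (n : Int) 1).map
        (fun i => if (o : Int) < i then (1 : Int) else 0)
      = List.replicate (min n (o + 1)) 0 ++ List.replicate (n - (o + 1)) 1 := by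
  intro n
  induction n with
  | zero => simp [PySem.List.pyRange_one_eq_nil]
  | succ n ih =>
      rw [show ((n + 1 : Nat) : Int) = (n : Int) + 1 by push_cast; ring,
        PySem.List.pyRange_one_succ_right (Int.natCast_nonneg n),
        List.map_append, ih]
      by_cases h : o < n
      · have hlast : (if (o : Int) < (n : Int) then (1 : Int) else 0) = 1 := by
          rw [if_pos (by exact_mod_cast h)]
        have hm1 : min (n + 1) (o + 1) = o + 1 := by omega
        have hm2 : min n (o + 1) = o + 1 := by omega
        have hr : n + 1 - (o + 1) = (n - (o + 1)) + 1 := by omega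
        rw [List.map_singleton, hlast, hm1, hm2, hr]
        simp [List.replicate_succ']
      · have hlast : (if (o : Int) < (n : Int) then (1 : Int) else 0) = 0 := by
          rw [if_neg (by exact_mod_cast h)]
        have hm1 : min (n + 1) (o + 1) = n + 1 := by omega
        have hm2 : min n (o + 1) = n := by omega
        have hr1 : n + 1 - (o + 1) = 0 := by omega
        have hr2 : n - (o + 1) = 0 := by omega
        rw [List.map_singleton, hlast, hm1, hm2, hr1, hr2, List.replicate_succ']
        simp

-- ===== VERDICT (by name: the statement is the Claim_ definition above) =====
theorem get_event_by_visit_spec : Claim_equal_get_event_by_visit := by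
  intro Alist _ hpre
  unfold Spec_get_event_by_visit
  cases Alist with
  | nil => exact absurd rfl hpre
  | cons a rest =>
      unfold get_event_by_visit get_event_by_visit_alt
      simp only [pvLoop_result a rest]
      rw [PySem.List.slice_from_one, List.tail_cons,
        pvGaps_eq_filterMap rest a 0, zero_add]
      have hgaps := pvFindOnset_gaps rest a 1 0 (by omega)
      simp only [Nat.sub_zero, Nat.cast_one] at hgaps
      cases hfo : pvFindOnset a 1 0 rest with
      | none =>
          rw [hfo] at hgaps
          simp only [Option.map] at hgaps
          have hlen : (pvGaps a 1 rest).length ≤ 1 := by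
            by_contra hl
            rw [List.getElem?_eq_getElem (by omega)] at hgaps
            exact Option.some_ne_none _ hgaps
          have hcond : ∀ i : Int,
              (if 2 ≤ (pvGaps a 1 rest).length ∧
                  PySem.List.pyGetD (pvGaps a 1 rest) 1 0 < i then (1 : Int) else 0) = 0 := by
            intro i; rw [if_neg]; rintro ⟨h2, -⟩; omega
          rw [List.map_congr_left (fun i _ => hcond i), List.map_const']
          simp [PySem.List.length_pyRange_one]
      | some o =>
          rw [hfo] at hgaps
          simp only [Option.map] at hgaps
          have ho : o < 1 + rest.length := pvFindOnset_lt rest a 1 0 o hfo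
          have hlt : 1 < (pvGaps a 1 rest).length := by
            by_contra hl
            rw [List.getElem?_eq_none_iff.mpr (by omega)] at hgaps
            exact (Option.some_ne_none _ hgaps.symm)
          have hget : PySem.List.pyGetD (pvGaps a 1 rest) 1 0 = (o : Int) := by
            rw [PySem.List.pyGetD_ofNat' _ 1 0, List.getD_eq_getElem?_getD, hgaps]
            rfl
          have hcond : ∀ i : Int,
              (if 2 ≤ (pvGaps a 1 rest).length ∧
                  PySem.List.pyGetD (pvGaps a 1 rest) 1 0 < i then (1 : Int) else 0)
                = (if (o : Int) < i then (1 : Int) else 0) := by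
            intro i
            rw [hget]
            by_cases h : (o : Int) < i
            · rw [if_pos ⟨by omega, h⟩, if_pos h]
            · rw [if_neg (by rintro ⟨-, h'⟩; exact h h'), if_neg h]
          rw [List.map_congr_left (fun i _ => hcond i), pvMapThresh o ((a :: rest).length)]
          have hmin : min (a :: rest).length (o + 1) = o + 1 := by
            simp only [List.length_cons]; omega
          rw [hmin]
          have hlenA : (List.replicate (o + 1) (0 : Int)
              ++ List.replicate ((a :: rest).length - (o + 1)) (1 : Int)).length
              = (a :: rest).length := by simp; omega
          simp only [hlenA]
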